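-- pv_equiv track=rewrite | github.com/juampamuc/ai-performance-engineering | code/cluster/fabric/evaluator.py | _result_state
-- ===== SOURCE A (Python) =====
-- from typing import Any, Callable
--
-- def _result_state(results: list[dict[str, Any]]) -> str:
--     if not results:
--         return "not_configured"
--     if all(result.get("status") == "ok" for result in results):
--         return "ok"
--     if any(result.get("status") == "ok" for result in results):
--         return "partial"
--     return "error"
-- ===== SOURCE B (Python) =====
-- def _result_state(results):
--     if not results:
--         return "not_configured"
--     first_ok = results[0].get("status") == "ok"
--     if any((r.get("status") == "ok") != first_ok for r in results[1:]):
--         return "partial"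
--     return "ok" if first_ok else "error"
-- ===== Notes on version B (the rewrite author's own statement) =====
-- stated objective: alternative
-- what changed: B classifies by homogeneity relative to the first element: it compares each remaining result's ok-ness to the first's, returning 'partial' on any disagreement, else 'ok' or 'error' according to the first element alone, instead of A's all/any scans for 'ok'.
import Mathlib
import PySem

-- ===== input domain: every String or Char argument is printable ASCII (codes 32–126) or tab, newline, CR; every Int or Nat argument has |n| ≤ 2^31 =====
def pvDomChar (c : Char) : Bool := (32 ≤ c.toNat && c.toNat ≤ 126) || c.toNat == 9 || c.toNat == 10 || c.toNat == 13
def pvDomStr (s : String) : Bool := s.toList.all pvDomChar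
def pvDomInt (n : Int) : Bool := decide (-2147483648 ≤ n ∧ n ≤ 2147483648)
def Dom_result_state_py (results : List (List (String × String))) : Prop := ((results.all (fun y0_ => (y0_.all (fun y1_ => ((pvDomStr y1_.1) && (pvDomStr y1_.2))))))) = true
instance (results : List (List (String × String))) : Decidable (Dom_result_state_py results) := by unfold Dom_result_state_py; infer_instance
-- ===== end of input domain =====

-- B classifies by homogeneity against the first element (mismatch => partial) instead of A's all/any 'ok' scans; objective: alternative decomposition, same cost.

-- ===== PORT A =====
def result_state_py (results : List (List (String × String))) : String :=
  if results = [] then "not_configured"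
  else if results.all (fun result => (PySem.Dict.mk result).get? "status" == some "ok") then "ok"
  else if results.any (fun result => (PySem.Dict.mk result).get? "status" == some "ok") then "partial"
  else "error"

-- ===== PORT B =====
def result_state_py_alt (results : List (List (String × String))) : String :=
  match results with
  | [] => "not_configured"
  | r0 :: rest =>
    let firstOk : Bool := (PySem.Dict.mk r0).get? "status" == some "ok"
    if rest.any (fun r => ((PySem.Dict.mk r).get? "status" == some "ok") != firstOk) then "partial"
    else if firstOk then "ok" else "error"

-- ===== PRECONDITION & SPEC =====
def Spec_result_state_py (results : List (List (String × String))) (out : String) : Prop := out = result_state_py_alt results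
instance (results : List (List (String × String))) (out : String) : Decidable (Spec_result_state_py results out) := by unfold Spec_result_state_py; infer_instance

-- ===== CLAIM (what is proved, stated in full; the proofs are below) =====
def Claim_equal_result_state_py : Prop := ∀ (results : List (List (String × String))), Dom_result_state_py results → Spec_result_state_py results (result_state_py results)

-- ===== LEMMAS AND PROOFS =====

-- ===== VERDICT (by name: the statement is the Claim_ definition above) =====
theorem result_state_py_spec : Claim_equal_result_state_py := by
  intro results _
  unfold Spec_result_state_py result_state_py result_state_py_alt
  match results with
  | [] => simp
  | r0 :: rest =>
    simp only [List.cons_ne_nil, if_false]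
    by_cases h0 : (PySem.Dict.mk r0).get? "status" = some "ok" <;>
      by_cases hhom : ∀ r ∈ rest,
          ((PySem.Dict.mk r).get? "status" = some "ok" ↔
            (PySem.Dict.mk r0).get? "status" = some "ok")
    · simp only [h0, iff_true] at hhom
      simp [h0]
      rw [if_pos hhom, if_neg (by rintro ⟨x, hx, hn⟩; exact hn (hhom x hx))]
    · simp only [not_forall, Classical.not_imp] at hhom
      obtain ⟨r, hr, hne⟩ := hhom
      have hnok : ¬ (PySem.Dict.mk r).get? "status" = some "ok" :=
        fun h => hne (iff_of_true h h0)
      have hnall : ¬ ∀ x ∈ rest, (PySem.Dict.mk x).get? "status" = some "ok" :=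
        fun h => hnok (h r hr)
      have hmis : ∃ x ∈ rest,
          ¬((PySem.Dict.mk x).get? "status" = some "ok" ↔
            (PySem.Dict.mk r0).get? "status" = some "ok") := ⟨r, hr, hne⟩
      simp [h0, hnall, hmis]
    · simp only [h0, iff_false] at hhom
      have hnmis : ¬ ∃ x ∈ rest,
          ¬((PySem.Dict.mk x).get? "status" = some "ok" ↔
            (PySem.Dict.mk r0).get? "status" = some "ok") := by
        rintro ⟨x, hx, hne⟩
        exact hne (iff_of_false (hhom x hx) h0)
      simp only [not_exists] at hnmis
      simp [h0, hhom, hnmis]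
    · simp only [not_forall, Classical.not_imp] at hhom
      obtain ⟨r, hr, hne⟩ := hhom
      have hok : (PySem.Dict.mk r).get? "status" = some "ok" := by
        by_contra hnp; exact hne (iff_of_false hnp h0)
      have hanyrest : ∃ x ∈ rest, (PySem.Dict.mk x).get? "status" = some "ok" :=
        ⟨r, hr, hok⟩
      have hmis : ∃ x ∈ rest,
          ¬((PySem.Dict.mk x).get? "status" = some "ok" ↔
            (PySem.Dict.mk r0).get? "status" = some "ok") := ⟨r, hr, hne⟩
      simp [h0, hanyrest, hmis]
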